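-- pv_equiv track=rewrite | github.com/lakazatong/satis | src/cost.py | count_splits
-- ===== SOURCE A (Python) =====
-- def count_splits(n, m):
-- 	result = 0
-- 	nodes = 1
-- 	for _ in range(n):
-- 		nodes *= 2
-- 		result += nodes // 2
-- 	for _ in range(m):
-- 		nodes *= 3
-- 		result += nodes // 3
-- 	return result
-- ===== SOURCE B (Python) =====
-- def count_splits(n, m):
-- 	n2 = 2 ** max(n, 0)
-- 	m3 = 3 ** max(m, 0)
-- 	return (n2 - 1) + n2 * (m3 - 1) // 2
-- ===== Notes on version B (the rewrite author's own statement) =====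
-- stated objective: faster
-- what changed: Replaces the two O(n)+O(m) accumulation loops with the closed form (2^n - 1) + 2^n*(3^m - 1)//2 computed by fast exponentiation.
import Mathlib
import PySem

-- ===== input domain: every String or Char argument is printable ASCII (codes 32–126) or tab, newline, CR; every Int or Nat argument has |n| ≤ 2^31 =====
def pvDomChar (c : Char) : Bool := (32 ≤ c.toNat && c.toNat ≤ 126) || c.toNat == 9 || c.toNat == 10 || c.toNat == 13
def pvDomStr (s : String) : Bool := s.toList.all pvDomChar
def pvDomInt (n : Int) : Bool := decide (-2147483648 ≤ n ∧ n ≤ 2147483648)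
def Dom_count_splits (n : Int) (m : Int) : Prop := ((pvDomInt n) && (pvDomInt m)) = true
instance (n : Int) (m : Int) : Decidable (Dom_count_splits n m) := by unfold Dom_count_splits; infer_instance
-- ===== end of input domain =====

-- B replaces A's two accumulation loops with the closed form (2^n - 1) + 2^n*(3^m - 1)//2 (faster: O(log) pow vs O(n+m) loop).

-- ===== PORT A =====
def count_splits (n : Int) (m : Int) : Int :=
  let st1 := (PySem.List.pyRange 0 n 1).foldl
    (fun (st : Int × Int) _ => (st.1 + PySem.Int.floordiv (st.2 * 2) 2, st.2 * 2)) (0, 1)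
  let st2 := (PySem.List.pyRange 0 m 1).foldl
    (fun (st : Int × Int) _ => (st.1 + PySem.Int.floordiv (st.2 * 3) 3, st.2 * 3)) st1
  st2.1

-- ===== PORT B =====
def count_splits_alt (n : Int) (m : Int) : Int :=
  let n2 : Int := 2 ^ (max n 0).toNat
  let m3 : Int := 3 ^ (max m 0).toNat
  (n2 - 1) + PySem.Int.floordiv (n2 * (m3 - 1)) 2

-- ===== PRECONDITION & SPEC =====
def Spec_count_splits (n : Int) (m : Int) (out : Int) : Prop := out = count_splits_alt n m
instance (n : Int) (m : Int) (out : Int) : Decidable (Spec_count_splits n m out) := by unfold Spec_count_splits; infer_instance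

-- ===== CLAIM (what is proved, stated in full; the proofs are below) =====
def Claim_equal_count_splits : Prop := ∀ (n : Int) (m : Int), Dom_count_splits n m → Spec_count_splits n m (count_splits n m)

-- ===== LEMMAS AND PROOFS =====

-- the first loop, run k times from state (r, v), ends at (r + v*(2^k - 1), v * 2^k)
theorem loop2_eval (k : Nat) (r v : Int) :
    (List.range k).foldl
      (fun (st : Int × Int) _ => (st.1 + PySem.Int.floordiv (st.2 * 2) 2, st.2 * 2)) (r, v)
    = (r + v * (2 ^ k - 1), v * 2 ^ k) := by
  induction k generalizing r v with
  | zero => simp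
  | succ k ih =>
    rw [List.range_succ, List.foldl_append, ih]
    simp only [List.foldl_cons, List.foldl_nil]
    have h2 : PySem.Int.floordiv (v * 2 ^ k * 2) 2 = v * 2 ^ k := by
      rw [PySem.Int.floordiv_eq_ediv_of_pos (by norm_num)]
      exact Int.mul_ediv_cancel _ (by norm_num)
    rw [h2, Prod.mk.injEq]
    exact ⟨by ring, by ring⟩

-- the second loop, run k times from state (r, v), ends at (r + v*s, v*3^k) with 2*s = 3^k - 1
-- (the sum s of the geometric series is kept via 2*s = 3^k - 1 to avoid division in the statement)
theorem loop3_eval (k : Nat) (r v : Int) :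
    ∃ s : Int, 2 * s = 3 ^ k - 1 ∧
        (List.range k).foldl
          (fun (st : Int × Int) _ => (st.1 + PySem.Int.floordiv (st.2 * 3) 3, st.2 * 3)) (r, v)
        = (r + v * s, v * 3 ^ k) := by
  induction k generalizing r v with
  | zero => exact ⟨0, by norm_num, by simp⟩
  | succ k ih =>
    obtain ⟨s, hs, hfold⟩ := ih r v
    refine ⟨s + 3 ^ k, by rw [mul_add, hs]; ring, ?_⟩
    rw [List.range_succ, List.foldl_append, hfold]
    simp only [List.foldl_cons, List.foldl_nil]
    have h3 : PySem.Int.floordiv (v * 3 ^ k * 3) 3 = v * 3 ^ k := by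
      rw [PySem.Int.floordiv_eq_ediv_of_pos (by norm_num)]
      exact Int.mul_ediv_cancel _ (by norm_num)
    rw [h3, Prod.mk.injEq]
    exact ⟨by ring, by ring⟩

-- folding a constant-shape step over pyRange 0 b 1 = folding it over List.range (b.toNat)
theorem fold_pyRange_eq {α : Type} (b : Int) (f : α → α) (init : α) :
    (PySem.List.pyRange 0 b 1).foldl (fun st _ => f st) init
    = (List.range b.toNat).foldl (fun st _ => f st) init := by
  rw [PySem.List.pyRange_one, List.foldl_map]
  norm_num

-- ===== VERDICT (by name: the statement is the Claim_ definition above) =====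
theorem count_splits_spec : Claim_equal_count_splits := by
  intro n m _
  show count_splits n m = count_splits_alt n m
  simp only [count_splits, count_splits_alt]
  rw [fold_pyRange_eq n (fun st => (st.1 + PySem.Int.floordiv (st.2 * 2) 2, st.2 * 2)) ((0 : Int), (1 : Int)),
      loop2_eval,
      fold_pyRange_eq m (fun st => (st.1 + PySem.Int.floordiv (st.2 * 3) 3, st.2 * 3)) _]
  obtain ⟨s, hs, h⟩ := loop3_eval m.toNat (0 + 1 * (2 ^ n.toNat - 1)) (1 * 2 ^ n.toNat)
  rw [h]
  have hmax_n : (max n 0).toNat = n.toNat := by omega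
  have hmax_m : (max m 0).toNat = m.toNat := by omega
  rw [hmax_n, hmax_m]
  rw [PySem.Int.floordiv_eq_ediv_of_pos (by norm_num)]
  have hkey : (2:Int) ^ n.toNat * (3 ^ m.toNat - 1) = (2 ^ n.toNat * s) * 2 := by
    rw [← hs]; ring
  rw [hkey, Int.mul_ediv_cancel _ (by norm_num)]
  ring
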